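-- pv_equiv track=rewrite | github.com/nnthony/RPA_calificaciones | eval/PC1/2/5.py | eliminar_mayor_menor
-- ===== SOURCE A (Python) =====
-- def eliminar_mayor_menor(num):
--     # Variables para almacenar el número modificado
--     resultado = 0
--     factor = 1  # Se usa para colocar los dígitos en la posición correcta
--
--     # Encontrar el mayor y menor dígito
--     mayor = -1
--     menor = 10
--     temp = num
--
--     while temp > 0:
--         digito = temp % 10
--         if digito > mayor:
--             mayor = digito
--         if digito < menor:
--             menor = digito
--         temp //= 10
--
--     # Eliminar el mayor y menor dígito y construir el número modificado
--     temp = num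
--     while temp > 0:
--         digito = temp % 10
--         if digito != mayor and digito != menor:
--             resultado += digito * factor
--             factor *= 10
--         temp //= 10
--
--     return resultado
-- ===== SOURCE B (Python) =====
-- def eliminar_mayor_menor(num):
--     # Mark which digits occur in a fixed ten-slot histogram, read the extremes off
--     # the histogram, then splice the offending digits out of the number
--     # arithmetically in place (no rebuilt accumulator).
--     seen = [False] * 10
--     n = num
--     while n > 0:
--         seen[n % 10] = True
--         n //= 10
--     extremos = [d for d in range(10) if seen[d]]
--     if not extremos:
--         return 0
--     menor = extremos[0]
--     mayor = extremos[-1]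
--     res = num
--     p = 1
--     while res // p > 0:
--         if res // p % 10 in (menor, mayor):
--             res = res // (p * 10) * p + res % p
--         else:
--             p *= 10
--     return res
-- ===== Notes on version B (the rewrite author's own statement) =====
-- stated objective: alternative
-- what changed: B marks occurring digits in a fixed ten-slot boolean histogram, reads menor/mayor as the first and last marked slot, and then deletes the offending digits from the number itself by arithmetic splicing (res = res//(p*ten)*p + res%p), instead of A's running max/min comparisons and factor-accumulating rebuild of a fresh number.
import Mathlib
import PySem

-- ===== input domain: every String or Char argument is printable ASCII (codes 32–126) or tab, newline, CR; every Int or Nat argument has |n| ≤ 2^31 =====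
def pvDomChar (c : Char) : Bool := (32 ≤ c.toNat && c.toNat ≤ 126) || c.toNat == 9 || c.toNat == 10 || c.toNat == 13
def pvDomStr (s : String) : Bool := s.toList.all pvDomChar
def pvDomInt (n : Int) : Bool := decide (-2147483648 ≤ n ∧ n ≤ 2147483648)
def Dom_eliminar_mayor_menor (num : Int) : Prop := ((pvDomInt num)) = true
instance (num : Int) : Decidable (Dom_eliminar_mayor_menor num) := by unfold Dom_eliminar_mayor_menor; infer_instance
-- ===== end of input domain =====

-- B replaces A's running max/min comparisons and factor-accumulating rebuild by a
-- fixed ten-slot digit histogram read for its extremes and an in-place arithmetic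
-- splice that deletes offending digits from the number itself (objective: alternative).

-- ===== PORT A =====
-- first while loop of A: running max/min over the digits of temp
def pvFindMM (temp mayor menor : Int) : Int × Int :=
  if h : 0 < temp then
    let digito := PySem.Int.mod temp 10
    let mayor' := if digito > mayor then digito else mayor
    let menor' := if digito < menor then digito else menor
    pvFindMM (PySem.Int.floordiv temp 10) mayor' menor'
  else (mayor, menor)
termination_by temp.toNat
decreasing_by
  rw [PySem.Int.floordiv_eq_ediv_of_pos (by omega : (0:Int) < 10)]
  omega

-- second while loop of A: rebuild skipping mayor/menor, with a growing factor
def pvBuild (temp mayor menor resultado factor : Int) : Int :=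
  if h : 0 < temp then
    let digito := PySem.Int.mod temp 10
    if digito ≠ mayor ∧ digito ≠ menor then
      pvBuild (PySem.Int.floordiv temp 10) mayor menor (resultado + digito * factor) (factor * 10)
    else
      pvBuild (PySem.Int.floordiv temp 10) mayor menor resultado factor
  else resultado
termination_by temp.toNat
decreasing_by
  all_goals
    rw [PySem.Int.floordiv_eq_ediv_of_pos (by omega : (0:Int) < 10)]
    omega

def eliminar_mayor_menor (num : Int) : Int :=
  let mm := pvFindMM num (-1) 10
  pvBuild num mm.1 mm.2 0 1

-- ===== PORT B =====
-- B's first while loop: mark which digits occur in the ten-slot histogram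
def pvSeenLoop (n : Int) (seen : List Bool) : List Bool :=
  if h : 0 < n then
    pvSeenLoop (PySem.Int.floordiv n 10) (PySem.List.pySetD seen (PySem.Int.mod n 10) true)
  else seen
termination_by n.toNat
decreasing_by
  rw [PySem.Int.floordiv_eq_ediv_of_pos (by omega : (0:Int) < 10)]
  omega

-- termination facts for B's splice loop (cited by pvSplice's decreasing_by)
theorem pvSpliceDecKeep (res p : Int) (hp : 0 < p) (h : 0 < PySem.Int.floordiv res p) :
    (PySem.Int.floordiv res (p * 10)).toNat < (PySem.Int.floordiv res p).toNat := by
  rw [PySem.Int.floordiv_eq_ediv_of_pos hp] at h ⊢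
  rw [PySem.Int.floordiv_eq_ediv_of_pos (by omega : (0:Int) < p * 10)]
  rw [← Int.ediv_ediv_of_nonneg (le_of_lt hp)]
  have h1 : res / p / 10 < res / p := by
    rw [Int.ediv_lt_iff_lt_mul (by norm_num)]; omega
  have h2 : 0 ≤ res / p / 10 := Int.ediv_nonneg (le_of_lt h) (by norm_num)
  omega

theorem pvSpliceDecDrop (res p : Int) (hp : 0 < p) (h : 0 < PySem.Int.floordiv res p) :
    (PySem.Int.floordiv (PySem.Int.floordiv res (p * 10) * p + PySem.Int.mod res p) p).toNat
      < (PySem.Int.floordiv res p).toNat := by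
  have key : PySem.Int.floordiv (PySem.Int.floordiv res (p * 10) * p + PySem.Int.mod res p) p
      = PySem.Int.floordiv res (p * 10) := by
    rw [PySem.Int.floordiv_eq_ediv_of_pos hp,
      PySem.Int.floordiv_eq_ediv_of_pos (by omega : (0:Int) < p * 10),
      PySem.Int.mod_eq_emod_of_pos hp]
    rw [add_comm, Int.add_mul_ediv_right _ _ (by omega : p ≠ 0)]
    rw [Int.ediv_eq_zero_of_lt (Int.emod_nonneg res (by omega)) (Int.emod_lt_of_pos res hp)]
    ring
  rw [key]
  exact pvSpliceDecKeep res p hp h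

-- B's second while loop: splice out digits equal to menor/mayor arithmetically
def pvSplice (menor mayor res p : Int) (hp : 0 < p) : Int :=
  if h : 0 < PySem.Int.floordiv res p then
    if PySem.Int.mod (PySem.Int.floordiv res p) 10 = menor
        ∨ PySem.Int.mod (PySem.Int.floordiv res p) 10 = mayor then
      pvSplice menor mayor (PySem.Int.floordiv res (p * 10) * p + PySem.Int.mod res p) p hp
    else
      pvSplice menor mayor res (p * 10) (by omega)
  else res
termination_by (PySem.Int.floordiv res p).toNat
decreasing_by
  · exact pvSpliceDecDrop res p hp h
  · exact pvSpliceDecKeep res p hp h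

def eliminar_mayor_menor_alt (num : Int) : Int :=
  let seen := pvSeenLoop num (List.replicate 10 false)
  let extremos := (PySem.List.pyRange 0 10 1).filter (fun d => PySem.List.pyGetD seen d false)
  if extremos = [] then 0
  else
    let menor := PySem.List.pyGetD extremos 0 0
    let mayor := PySem.List.pyGetD extremos (-1) 0
    pvSplice menor mayor num 1 (by norm_num)

-- ===== PRECONDITION & SPEC =====
def Spec_eliminar_mayor_menor (num : Int) (out : Int) : Prop := out = eliminar_mayor_menor_alt num
instance (num : Int) (out : Int) : Decidable (Spec_eliminar_mayor_menor num out) := by unfold Spec_eliminar_mayor_menor; infer_instance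

-- ===== CLAIM (what is proved, stated in full; the proofs are below) =====
def Claim_equal_eliminar_mayor_menor : Prop := ∀ (num : Int), Dom_eliminar_mayor_menor num → Spec_eliminar_mayor_menor num (eliminar_mayor_menor num)

-- ===== LEMMAS AND PROOFS =====

-- the digits of n, least-significant first (proof-side description of both loops)
def pvDigitsLS (n : Int) : List Int :=
  if h : 0 < n then PySem.Int.mod n 10 :: pvDigitsLS (PySem.Int.floordiv n 10) else []
termination_by n.toNat
decreasing_by
  rw [PySem.Int.floordiv_eq_ediv_of_pos (by omega : (0:Int) < 10)]
  omega

-- value of a least-significant-first digit list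
def pvVal (ds : List Int) : Int := ds.foldr (fun d acc => acc * 10 + d) 0

theorem pvDigits_bounds : ∀ (n d : Int), d ∈ pvDigitsLS n → 0 ≤ d ∧ d < 10 := by
  intro n
  induction n using pvDigitsLS.induct with
  | case1 n h ih =>
    intro d hd
    rw [pvDigitsLS, dif_pos h] at hd
    rcases List.mem_cons.mp hd with rfl | hd
    · exact ⟨PySem.Int.mod_nonneg _ (by omega), PySem.Int.mod_lt _ (by omega)⟩
    · exact ih d hd
  | case2 n h =>
    intro d hd
    rw [pvDigitsLS, dif_neg h] at hd
    simp at hd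

theorem pvFindMM_eq : ∀ (temp a b : Int),
    pvFindMM temp a b = ((pvDigitsLS temp).foldl max a, (pvDigitsLS temp).foldl min b) := by
  intro temp
  induction temp using pvDigitsLS.induct with
  | case1 n h ih =>
    intro a b
    rw [pvFindMM, dif_pos h, pvDigitsLS, dif_pos h]
    simp only [List.foldl_cons]
    rw [ih]
    congr 2
    · show (if PySem.Int.mod n 10 > a then PySem.Int.mod n 10 else a) = max a (PySem.Int.mod n 10)
      split <;> omega
    · show (if PySem.Int.mod n 10 < b then PySem.Int.mod n 10 else b) = min b (PySem.Int.mod n 10)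
      split <;> omega
  | case2 n h =>
    intro a b
    rw [pvFindMM, dif_neg h, pvDigitsLS, dif_neg h]
    simp

theorem pvBuild_eq : ∀ (temp m mn r f : Int),
    pvBuild temp m mn r f
      = r + f * pvVal ((pvDigitsLS temp).filter (fun d => d ≠ m && d ≠ mn)) := by
  intro temp
  induction temp using pvDigitsLS.induct with
  | case1 n h ih =>
    intro m mn r f
    rw [pvBuild, dif_pos h, pvDigitsLS, dif_pos h]
    by_cases hc : PySem.Int.mod n 10 ≠ m ∧ PySem.Int.mod n 10 ≠ mn
    · rw [if_pos hc, ih]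
      have : (PySem.Int.mod n 10 :: pvDigitsLS (PySem.Int.floordiv n 10)).filter
          (fun d => d ≠ m && d ≠ mn)
          = PySem.Int.mod n 10 ::
            (pvDigitsLS (PySem.Int.floordiv n 10)).filter (fun d => d ≠ m && d ≠ mn) := by
        have hm : PySem.Int.mod n 10 = n % 10 := PySem.Int.mod_eq_emod_of_pos (by omega)
        exact List.filter_cons_of_pos (by rw [hm] at hc; simp [hc.1, hc.2])
      rw [this]
      simp only [pvVal, List.foldr_cons]
      ring
    · rw [if_neg hc, ih]
      have : (PySem.Int.mod n 10 :: pvDigitsLS (PySem.Int.floordiv n 10)).filter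
          (fun d => d ≠ m && d ≠ mn)
          = (pvDigitsLS (PySem.Int.floordiv n 10)).filter (fun d => d ≠ m && d ≠ mn) := by
        refine List.filter_cons_of_neg ?_
        rcases Decidable.not_and_iff_or_not.mp hc with h' | h' <;> simp at h' <;> simp [h']
      rw [this]
  | case2 n h =>
    intro m mn r f
    rw [pvBuild, dif_neg h, pvDigitsLS, dif_neg h]
    simp [pvVal]

-- the histogram loop: lookup after the loop = lookup before ∨ digit occurs
theorem pvSeenLoop_getD : ∀ (n : Int) (s : List Bool), s.length = 10 →
    ∀ (d : Int), 0 ≤ d → d < 10 →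
    PySem.List.pyGetD (pvSeenLoop n s) d false
      = (PySem.List.pyGetD s d false || decide (d ∈ pvDigitsLS n)) := by
  intro n
  induction n using pvDigitsLS.induct with
  | case1 n h ih =>
    intro s hlen d hd0 hd10
    rw [pvSeenLoop, dif_pos h, pvDigitsLS, dif_pos h]
    have hj0 : 0 ≤ PySem.Int.mod n 10 := PySem.Int.mod_nonneg _ (by omega)
    have hj10 : PySem.Int.mod n 10 < 10 := PySem.Int.mod_lt _ (by omega)
    have hjcast : PySem.Int.mod n 10 = (((PySem.Int.mod n 10).toNat : Nat) : Int) :=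
      (Int.toNat_of_nonneg hj0).symm
    have hdcast : d = ((d.toNat : Nat) : Int) := (Int.toNat_of_nonneg hd0).symm
    have hlen' : (PySem.List.pySetD s (PySem.Int.mod n 10) true).length = 10 := by
      rw [PySem.List.length_pySetD]; exact hlen
    rw [ih _ hlen' d hd0 hd10]
    rw [hjcast, hdcast,
      PySem.List.pyGetD_pySetD_natCast s (PySem.Int.mod n 10).toNat d.toNat true false (by omega)]
    by_cases hdj : d.toNat = (PySem.Int.mod n 10).toNat
    · simp [hdj]
    · rw [if_neg (by exact_mod_cast hdj)]
      have : (((d.toNat : Nat) : Int) ∈ (((PySem.Int.mod n 10).toNat : Nat) : Int)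
            :: pvDigitsLS (PySem.Int.floordiv n 10))
          ↔ ((d.toNat : Nat) : Int) ∈ pvDigitsLS (PySem.Int.floordiv n 10) := by
        rw [List.mem_cons]; exact or_iff_right (by exact_mod_cast hdj)
      simp only [decide_eq_decide.mpr this]
  | case2 n h =>
    intro s _ d _ _
    rw [pvSeenLoop, dif_neg h, pvDigitsLS, dif_neg h]
    simp

-- head of a filter over a strictly increasing list is the least satisfier
theorem head_filter_min : ∀ (L : List Int) (P : Int → Bool) (m : Int),
    L.Pairwise (· < ·) → m ∈ L → P m = true → (∀ x, P x = true → m ≤ x) →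
    (L.filter P).head? = some m := by
  intro L P m
  induction L with
  | nil => intro _ hm; simp at hm
  | cons a t ih =>
    intro hpw hm hPm hlb
    rcases List.mem_cons.mp hm with rfl | hmt
    · rw [List.filter_cons_of_pos hPm]; rfl
    · have ha : a < m := (List.pairwise_cons.mp hpw).1 m hmt
      have hPa : P a = false := by
        cases hP : P a
        · rfl
        · exact absurd (hlb a hP) (by omega)
      rw [List.filter_cons_of_neg (by simp [hPa])]
      exact ih (List.pairwise_cons.mp hpw).2 hmt hPm hlb

-- dually, over a strictly decreasing list the head is the greatest satisfier
theorem head_filter_max : ∀ (L : List Int) (P : Int → Bool) (M : Int),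
    L.Pairwise (· > ·) → M ∈ L → P M = true → (∀ x, P x = true → x ≤ M) →
    (L.filter P).head? = some M := by
  intro L P M
  induction L with
  | nil => intro _ hm; simp at hm
  | cons a t ih =>
    intro hpw hm hPM hub
    rcases List.mem_cons.mp hm with rfl | hmt
    · rw [List.filter_cons_of_pos hPM]; rfl
    · have ha : M < a := (List.pairwise_cons.mp hpw).1 M hmt
      have hPa : P a = false := by
        cases hP : P a
        · rfl
        · exact absurd (hub a hP) (by omega)
      rw [List.filter_cons_of_neg (by simp [hPa])]
      exact ih (List.pairwise_cons.mp hpw).2 hmt hPM hub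

theorem foldl_min_mem : ∀ (L : List Int) (a : Int), L.foldl min a ∈ a :: L := by
  intro L
  induction L with
  | nil => intro a; simp
  | cons x t ih =>
    intro a
    have hfold : (x :: t).foldl min a = t.foldl min (min a x) := by rw [List.foldl_cons]
    rw [hfold]
    rcases List.mem_cons.mp (ih (min a x)) with hm | hm
    · rw [hm]
      rcases min_choice a x with hc | hc <;> rw [hc]
      · exact List.mem_cons_self ..
      · exact List.mem_cons_of_mem _ (List.mem_cons_self ..)
    · exact List.mem_cons_of_mem _ (List.mem_cons_of_mem _ hm)

theorem foldl_min_le_init : ∀ (L : List Int) (a : Int), L.foldl min a ≤ a := by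
  intro L
  induction L with
  | nil => intro a; simp
  | cons x t ih =>
    intro a
    calc (x :: t).foldl min a = t.foldl min (min a x) := by rw [List.foldl_cons]
    _ ≤ min a x := ih _
    _ ≤ a := min_le_left _ _

theorem foldl_min_le : ∀ (L : List Int) (a x : Int), x ∈ L → L.foldl min a ≤ x := by
  intro L
  induction L with
  | nil => intro a x hx; simp at hx
  | cons y t ih =>
    intro a x hx
    rcases List.mem_cons.mp hx with rfl | hxt
    · calc (x :: t).foldl min a = t.foldl min (min a x) := by rw [List.foldl_cons]
      _ ≤ min a x := foldl_min_le_init _ _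
      _ ≤ x := min_le_right _ _
    · rw [List.foldl_cons]; exact ih _ x hxt

theorem foldl_max_mem : ∀ (L : List Int) (a : Int), L.foldl max a ∈ a :: L := by
  intro L
  induction L with
  | nil => intro a; simp
  | cons x t ih =>
    intro a
    have hfold : (x :: t).foldl max a = t.foldl max (max a x) := by rw [List.foldl_cons]
    rw [hfold]
    rcases List.mem_cons.mp (ih (max a x)) with hm | hm
    · rw [hm]
      rcases max_choice a x with hc | hc <;> rw [hc]
      · exact List.mem_cons_self ..
      · exact List.mem_cons_of_mem _ (List.mem_cons_self ..)
    · exact List.mem_cons_of_mem _ (List.mem_cons_of_mem _ hm)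

theorem foldl_max_ge_init : ∀ (L : List Int) (a : Int), a ≤ L.foldl max a := by
  intro L
  induction L with
  | nil => intro a; simp
  | cons x t ih =>
    intro a
    calc a ≤ max a x := le_max_left _ _
    _ ≤ t.foldl max (max a x) := ih _
    _ = (x :: t).foldl max a := by rw [List.foldl_cons]

theorem foldl_max_ge : ∀ (L : List Int) (a x : Int), x ∈ L → x ≤ L.foldl max a := by
  intro L
  induction L with
  | nil => intro a x hx; simp at hx
  | cons y t ih =>
    intro a x hx
    rcases List.mem_cons.mp hx with rfl | hxt
    · calc x ≤ max a x := le_max_right _ _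
      _ ≤ t.foldl max (max a x) := foldl_max_ge_init _ _
      _ = (x :: t).foldl max a := by rw [List.foldl_cons]
    · rw [List.foldl_cons]; exact ih _ x hxt

-- the splice loop computes the value of the kept digits above the settled block
theorem pvSplice_congr : ∀ (m M r p p' : Int) (hp : 0 < p) (hp' : 0 < p'),
    p = p' → pvSplice m M r p hp = pvSplice m M r p' hp' := by
  intro m M r p p' hp hp' he
  subst he
  rfl

theorem pvSplice_eq : ∀ (a : Int), 0 ≤ a → ∀ (k : ℕ) (b m M : Int), 0 ≤ b → b < 10 ^ k →
    ∀ (hp : 0 < (10:Int) ^ k),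
    pvSplice m M (a * 10 ^ k + b) (10 ^ k) hp
      = pvVal ((pvDigitsLS a).filter (fun d => decide ¬(d = m ∨ d = M))) * 10 ^ k + b := by
  intro a
  induction a using pvDigitsLS.induct with
  | case1 n h ih =>
    intro _ k b m M hb0 hbk hp
    have hfd : PySem.Int.floordiv (n * 10 ^ k + b) (10 ^ k) = n := by
      rw [PySem.Int.floordiv_eq_ediv_of_pos hp, add_comm,
        Int.add_mul_ediv_right _ _ (by omega : (10:Int) ^ k ≠ 0),
        Int.ediv_eq_zero_of_lt hb0 hbk]
      ring
    have hmod : PySem.Int.mod (n * 10 ^ k + b) (10 ^ k) = b := by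
      rw [PySem.Int.mod_eq_emod_of_pos hp, add_comm, mul_comm,
        Int.add_mul_emod_self_left, Int.emod_eq_of_lt hb0 hbk]
    rw [pvSplice, dif_pos (by rw [hfd]; exact h), pvDigitsLS, dif_pos h]
    rw [hfd]
    by_cases hrm : PySem.Int.mod n 10 = m ∨ PySem.Int.mod n 10 = M
    · rw [if_pos hrm]
      have hfd10 : PySem.Int.floordiv (n * 10 ^ k + b) (10 ^ k * 10)
          = PySem.Int.floordiv n 10 := by
        rw [PySem.Int.floordiv_eq_ediv_of_pos (by positivity),
          PySem.Int.floordiv_eq_ediv_of_pos (by norm_num : (0:Int) < 10),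
          ← Int.ediv_ediv_of_nonneg (le_of_lt hp)]
        congr 1
        rw [add_comm, Int.add_mul_ediv_right _ _ (by omega : (10:Int) ^ k ≠ 0),
          Int.ediv_eq_zero_of_lt hb0 hbk]
        ring
      rw [hfd10, hmod]
      have hq0 : 0 ≤ PySem.Int.floordiv n 10 := by
        rw [PySem.Int.floordiv_eq_ediv_of_pos (by norm_num : (0:Int) < 10)]
        exact Int.ediv_nonneg (by omega) (by norm_num)
      rw [ih hq0 k b m M hb0 hbk hp]
      rw [List.filter_cons_of_neg (by
        have hm' : PySem.Int.mod n 10 = n % 10 := PySem.Int.mod_eq_emod_of_pos (by norm_num)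
        rw [hm'] at hrm
        rcases hrm with h' | h' <;> simp [h'])]
    · rw [if_neg hrm]
      have hq0 : 0 ≤ PySem.Int.floordiv n 10 := by
        rw [PySem.Int.floordiv_eq_ediv_of_pos (by norm_num : (0:Int) < 10)]
        exact Int.ediv_nonneg (by omega) (by norm_num)
      have hd0 : 0 ≤ PySem.Int.mod n 10 := PySem.Int.mod_nonneg _ (by omega)
      have hd10 : PySem.Int.mod n 10 < 10 := PySem.Int.mod_lt _ (by omega)
      have hsplit : PySem.Int.floordiv n 10 * 10 + PySem.Int.mod n 10 = n :=
        PySem.Int.floordiv_mul_add_mod n 10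
      have hres : n * 10 ^ k + b
          = PySem.Int.floordiv n 10 * 10 ^ (k + 1)
            + (PySem.Int.mod n 10 * 10 ^ k + b) := by
        calc n * 10 ^ k + b
            = (PySem.Int.floordiv n 10 * 10 + PySem.Int.mod n 10) * 10 ^ k + b := by
              rw [hsplit]
          _ = PySem.Int.floordiv n 10 * 10 ^ (k + 1)
              + (PySem.Int.mod n 10 * 10 ^ k + b) := by rw [pow_succ]; ring
      have hb0' : 0 ≤ PySem.Int.mod n 10 * 10 ^ k + b := by positivity
      have hbk' : PySem.Int.mod n 10 * 10 ^ k + b < 10 ^ (k + 1) := by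
        rw [pow_succ]
        nlinarith [hp]
      rw [pvSplice_congr m M (n * 10 ^ k + b) ((10:Int) ^ k * 10) ((10:Int) ^ (k + 1))
        (by positivity) (by positivity) (pow_succ 10 k).symm]
      rw [hres, ih hq0 (k + 1) (PySem.Int.mod n 10 * 10 ^ k + b) m M hb0' hbk'
        (by positivity)]
      rw [List.filter_cons_of_pos (by
        have hm' : PySem.Int.mod n 10 = n % 10 := PySem.Int.mod_eq_emod_of_pos (by norm_num)
        rw [hm'] at hrm
        push Not at hrm
        simp [hrm.1, hrm.2])]
      have hval : pvVal (PySem.Int.mod n 10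
            :: (pvDigitsLS (PySem.Int.floordiv n 10)).filter (fun d => decide ¬(d = m ∨ d = M)))
          = pvVal ((pvDigitsLS (PySem.Int.floordiv n 10)).filter
              (fun d => decide ¬(d = m ∨ d = M))) * 10 + PySem.Int.mod n 10 := by
        simp [pvVal]
      rw [hval, pow_succ]
      ring
  | case2 n h =>
    intro hn0 k b m M hb0 hbk hp
    have hn : n = 0 := by omega
    subst hn
    have hfd : PySem.Int.floordiv (0 * 10 ^ k + b) (10 ^ k) = 0 := by
      rw [zero_mul, zero_add, PySem.Int.floordiv_eq_ediv_of_pos hp,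
        Int.ediv_eq_zero_of_lt hb0 hbk]
    rw [pvSplice, dif_neg (by rw [hfd]; omega), pvDigitsLS, dif_neg h]
    simp [pvVal]

-- ===== VERDICT (by name: the statement is the Claim_ definition above) =====
theorem eliminar_mayor_menor_spec : Claim_equal_eliminar_mayor_menor := by
  intro num _
  unfold Spec_eliminar_mayor_menor eliminar_mayor_menor eliminar_mayor_menor_alt
  dsimp only
  by_cases h : 0 < num
  · -- positive input: both sides compute over the digit list
    rw [pvFindMM_eq, pvBuild_eq]
    have hds : pvDigitsLS num ≠ [] := by rw [pvDigitsLS, dif_pos h]; simp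
    set ds := pvDigitsLS num with hdsdef
    set m := ds.foldl min 10 with hmdef
    set M := ds.foldl max (-1) with hMdef
    have hbound : ∀ d ∈ ds, 0 ≤ d ∧ d < 10 := fun d hd => pvDigits_bounds num d hd
    obtain ⟨x₀, hx₀⟩ := List.exists_mem_of_ne_nil ds hds
    have hmmem : m ∈ ds := by
      rcases List.mem_cons.mp (foldl_min_mem ds 10) with hm10 | hm
      · have h1 := foldl_min_le ds 10 x₀ hx₀
        have h2 := (hbound x₀ hx₀).2
        rw [← hmdef] at hm10
        omega
      · exact hm
    have hMmem : M ∈ ds := by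
      rcases List.mem_cons.mp (foldl_max_mem ds (-1)) with hM1 | hM
      · have h1 := foldl_max_ge ds (-1) x₀ hx₀
        have h2 := (hbound x₀ hx₀).1
        rw [← hMdef] at hM1
        omega
      · exact hM
    have hm0 : 0 ≤ m := (hbound m hmmem).1
    have hm9 : m < 10 := (hbound m hmmem).2
    have hM0 : 0 ≤ M := (hbound M hMmem).1
    have hM9 : M < 10 := (hbound M hMmem).2
    -- the histogram lookups answer digit membership
    have hseen : ∀ d : Int, 0 ≤ d → d < 10 →
        PySem.List.pyGetD (pvSeenLoop num (List.replicate 10 false)) d false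
          = decide (d ∈ ds) := by
      intro d hd0 hd10
      rw [pvSeenLoop_getD num _ (by simp) d hd0 hd10]
      have hinit : PySem.List.pyGetD (List.replicate 10 (false : Bool)) d false = false := by
        rw [PySem.List.pyGetD_eq_getElem _ false hd0 (by simp; omega)]
        exact List.getElem_replicate _
      rw [hinit, Bool.false_or, hdsdef]
    have hcong : (PySem.List.pyRange 0 10 1).filter
          (fun d => PySem.List.pyGetD (pvSeenLoop num (List.replicate 10 false)) d false)
        = (PySem.List.pyRange 0 10 1).filter (fun d => decide (d ∈ ds)) :=
      List.filter_congr (by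
        intro x hx
        have hb := (PySem.List.mem_pyRange_one).mp hx
        exact hseen x hb.1 hb.2)
    rw [hcong]
    set ex := (PySem.List.pyRange 0 10 1).filter (fun d => decide (d ∈ ds)) with hexdef
    have hhead : ex.head? = some m :=
      head_filter_min _ _ m (PySem.List.pairwise_lt_pyRange_one 0 10)
        (PySem.List.mem_pyRange_one.mpr ⟨hm0, hm9⟩)
        (decide_eq_true hmmem)
        (fun x hx => foldl_min_le ds 10 x (of_decide_eq_true hx))
    have hlast : ex.getLast? = some M := by
      rw [← List.head?_reverse, hexdef, ← List.filter_reverse]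
      exact head_filter_max _ _ M
        (List.pairwise_reverse.mpr (by exact PySem.List.pairwise_lt_pyRange_one 0 10))
        (List.mem_reverse.mpr (PySem.List.mem_pyRange_one.mpr ⟨hM0, hM9⟩))
        (decide_eq_true hMmem)
        (fun x hx => foldl_max_ge ds (-1) x (of_decide_eq_true hx))
    obtain ⟨t, hext⟩ := List.head?_eq_some_iff.mp hhead
    have hexne : ex ≠ [] := by rw [hext]; simp
    rw [if_neg hexne]
    have hget0 : PySem.List.pyGetD ex 0 0 = m := by
      rw [hext, PySem.List.pyGetD_zero_cons]
    have hgetlast : PySem.List.pyGetD ex (-1) 0 = M := by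
      rw [PySem.List.pyGetD_neg_one ex 0 hexne]
      have hgl := List.getLast?_eq_some_getLast hexne
      rw [hgl] at hlast
      exact Option.some_injective _ hlast
    rw [hget0, hgetlast]
    -- evaluate the splice loop
    have hsp := pvSplice_eq num (le_of_lt h) 0 0 m M (le_refl 0) (by norm_num)
      (by norm_num)
    rw [show num * 10 ^ 0 + 0 = num from by ring] at hsp
    rw [← hdsdef] at hsp
    rw [pvSplice_congr m M num 1 ((10:Int) ^ 0) (by norm_num) (by norm_num) (by norm_num),
      hsp]
    have hfcong : ds.filter (fun d => decide ¬(d = m ∨ d = M))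
        = ds.filter (fun d => d ≠ M && d ≠ m) :=
      List.filter_congr (by
        intro x _
        by_cases h1 : x = m <;> by_cases h2 : x = M <;> simp [h1, h2])
    rw [hfcong]
    ring
  · -- non-positive input: both sides return 0
    rw [pvFindMM_eq, pvBuild_eq]
    rw [show pvDigitsLS num = [] from by rw [pvDigitsLS, dif_neg h]]
    rw [show pvSeenLoop num (List.replicate 10 false) = List.replicate 10 false from by
      rw [pvSeenLoop, dif_neg h]]
    have hext : ((PySem.List.pyRange 0 10 1).filter
        (fun d => PySem.List.pyGetD (List.replicate 10 false) d false)) = [] := by decide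
    rw [hext]
    simp [pvVal]
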